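-- pv_equiv track=rewrite | github.com/Jagadish-prasad-mohanty/codeForce-900 | napoleaonCake.py | getFinalCake
-- ===== SOURCE A (Python) =====
-- def getFinalCake(lis,n):
--     li=[1]*n
--     i=n-1
--     x=n
--     while i>=0:
--         if lis[i]>0:
--             if x>i-lis[i]+1:
--                 x=i-lis[i]+1
--         if i<x:
--             li[i]=0
--
--         i-=1
--
--
--     return li
-- ===== SOURCE B (Python) =====
-- def getFinalCake(lis, n):
--     # Stage 1: build a difference array of drench intervals [max(i-a+1,0), i].
--     diff = [0] * (n + 1)
--     for i in range(n):
--         a = lis[i]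
--         if a > 0:
--             diff[max(i - a + 1, 0)] += 1
--             diff[i + 1] -= 1
--     # Stage 2: prefix-sum sweep; a layer is drenched iff covered by some interval.
--     li = []
--     s = 0
--     for i in range(n):
--         s += diff[i]
--         li.append(1 if s > 0 else 0)
--     return li
-- ===== Notes on version B (the rewrite author's own statement) =====
-- stated objective: alternative
-- what changed: B replaces A's single right-to-left sweep with a maintained threshold index by a two-stage interval algorithm: a first left-to-right pass records every drench interval [max(i-lis[i]+1,0), i] in a difference array, and a second left-to-right prefix-sum pass marks a layer 1 iff some interval covers it.
import Mathlib
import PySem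

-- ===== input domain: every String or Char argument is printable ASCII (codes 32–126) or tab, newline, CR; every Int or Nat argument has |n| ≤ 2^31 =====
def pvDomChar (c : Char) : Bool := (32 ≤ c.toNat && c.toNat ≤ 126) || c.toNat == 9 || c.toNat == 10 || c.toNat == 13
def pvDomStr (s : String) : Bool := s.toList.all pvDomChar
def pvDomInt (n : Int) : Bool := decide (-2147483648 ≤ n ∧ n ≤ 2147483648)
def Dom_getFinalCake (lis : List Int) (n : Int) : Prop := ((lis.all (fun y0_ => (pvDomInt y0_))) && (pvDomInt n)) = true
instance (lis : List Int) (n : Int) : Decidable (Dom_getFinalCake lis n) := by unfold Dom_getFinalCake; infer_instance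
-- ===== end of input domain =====

-- B replaces A's single right-to-left threshold sweep by a two-stage interval algorithm
-- (difference array of drench intervals, then a left-to-right prefix-sum sweep); same O(n) cost.

-- ===== PORT A =====
-- A's while loop, i counting down from n-1; the counter k stands for i+1 (so i = k-1).
-- lis[i] is in range for every admitted input (Pre_); pyGetD gives it a default outside Pre_.
def getFinalCakeA_go (lis : List Int) : Nat → List Int → Int → List Int
  | 0, li, _ => li
  | k + 1, li, x =>
    let v := PySem.List.pyGetD lis (k : Int) 0
    let x' := if v > 0 ∧ x > (k : Int) - v + 1 then (k : Int) - v + 1 else x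
    let li' := if (k : Int) < x' then li.set k 0 else li
    getFinalCakeA_go lis k li' x'

def getFinalCake (lis : List Int) (n : Int) : List Int :=
  getFinalCakeA_go lis n.toNat (List.replicate n.toNat 1) n

-- ===== PORT B =====
-- Stage 1 of Source B: one body of `for i in range(n)`: diff[max(i-a+1,0)] += 1; diff[i+1] -= 1.
def getFinalCakeB_step (lis : List Int) (d : List Int) (i : Nat) : List Int :=
  if PySem.List.pyGetD lis (i : Int) 0 > 0 then
    ((d.set ((max ((i : Int) - PySem.List.pyGetD lis (i : Int) 0 + 1) 0).toNat)
        (d.getD ((max ((i : Int) - PySem.List.pyGetD lis (i : Int) 0 + 1) 0).toNat) 0 + 1)).set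
      (i + 1)
      ((d.set ((max ((i : Int) - PySem.List.pyGetD lis (i : Int) 0 + 1) 0).toNat)
          (d.getD ((max ((i : Int) - PySem.List.pyGetD lis (i : Int) 0 + 1) 0).toNat) 0 + 1)).getD
        (i + 1) 0 - 1))
  else d

def getFinalCakeB_diff (lis : List Int) (n : Int) : List Int :=
  (List.range n.toNat).foldl (getFinalCakeB_step lis) (List.replicate (n + 1).toNat 0)

-- Stage 2 of Source B: prefix-sum sweep appending 1/0.
def getFinalCake_alt (lis : List Int) (n : Int) : List Int :=
  ((List.range n.toNat).foldl (fun (p : Int × List Int) i =>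
      (p.1 + (getFinalCakeB_diff lis n).getD i 0,
       p.2 ++ [if p.1 + (getFinalCakeB_diff lis n).getD i 0 > 0 then (1 : Int) else 0]))
    ((0 : Int), ([] : List Int))).2

-- ===== PRECONDITION & SPEC =====
-- Pre_ excludes n > len(lis), where the Python A raises IndexError at lis[n-1] (so does B).
def Pre_getFinalCake (lis : List Int) (n : Int) : Prop := n ≤ (lis.length : Int)
instance (lis : List Int) (n : Int) : Decidable (Pre_getFinalCake lis n) := by unfold Pre_getFinalCake; infer_instance
def pvWitness_getFinalCake : List Int × Int := ([2, 0, 1], 3)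

def Spec_getFinalCake (lis : List Int) (n : Int) (out : List Int) : Prop := out = getFinalCake_alt lis n
instance (lis : List Int) (n : Int) (out : List Int) : Decidable (Spec_getFinalCake lis n out) := by unfold Spec_getFinalCake; infer_instance

-- ===== CLAIM (what is proved, stated in full; the proofs are below) =====
def Claim_equal_getFinalCake : Prop := ∀ (lis : List Int) (n : Int), Dom_getFinalCake lis n → Pre_getFinalCake lis n → Spec_getFinalCake lis n (getFinalCake lis n)

-- ===== LEMMAS AND PROOFS =====

-- Layer i is drenched by layer j iff i ≤ j and the syrup of layer j reaches down to i.
def coversB (lis : List Int) (i j : Nat) : Bool :=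
  decide (i ≤ j) &&
    decide (0 < PySem.List.pyGetD lis (j : Int) 0 ∧
            (j : Int) - PySem.List.pyGetD lis (j : Int) 0 + 1 ≤ (i : Int))

-- The common specification both ports are reduced to.
def cakeSpec (lis : List Int) (n' : Nat) : List Int :=
  (List.range n').map (fun i => if (List.range n').any (coversB lis i) then (1 : Int) else 0)

theorem coversB_iff (lis : List Int) (i j : Nat) :
    coversB lis i j = true ↔
      (i ≤ j ∧ 0 < PySem.List.pyGetD lis (j : Int) 0 ∧
        (j : Int) - PySem.List.pyGetD lis (j : Int) 0 + 1 ≤ (i : Int)) := by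
  simp only [coversB, Bool.and_eq_true, decide_eq_true_eq]

theorem sum_set_getD (d : List Int) : ∀ (t : Nat) (v : Int), t < d.length →
    (d.set t v).sum = d.sum + v - d.getD t 0 := by
  induction d with
  | nil => intro t v h; simp at h
  | cons a d ih =>
    intro t v h
    cases t with
    | zero => simp [List.set]; ring
    | succ t =>
      simp only [List.set, List.sum_cons, List.getD_cons_succ]
      rw [ih t v (by simpa using h)]
      ring

theorem sum_take_set (d : List Int) (t : Nat) (v : Int) (m : Nat) (ht : t < d.length) :
    ((d.set t v).take m).sum = (d.take m).sum + (if t < m then v - d.getD t 0 else 0) := by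
  rw [List.take_set]
  by_cases h : t < m
  · rw [sum_set_getD (d.take m) t v (by simp; omega), if_pos h]
    have : (d.take m).getD t 0 = d.getD t 0 := by
      rw [List.getD_eq_getElem _ _ (by simp; omega), List.getD_eq_getElem _ _ ht]
      simp
    rw [this]; ring
  · rw [List.set_eq_of_length_le (by simp; omega), if_neg h]
    ring

theorem step_length (lis d : List Int) (i : Nat) :
    (getFinalCakeB_step lis d i).length = d.length := by
  unfold getFinalCakeB_step
  split <;> simp

theorem step_prefix (lis d : List Int) (i m : Nat) (hd : i + 1 < d.length) :
    ((getFinalCakeB_step lis d i).take (m + 1)).sum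
      = (d.take (m + 1)).sum + (if coversB lis m i then (1 : Int) else 0) := by
  unfold getFinalCakeB_step
  by_cases ha : PySem.List.pyGetD lis (i : Int) 0 > 0
  · rw [if_pos ha]
    set a := PySem.List.pyGetD lis (i : Int) 0 with hA
    set l := (max ((i : Int) - a + 1) 0).toNat with hl
    have hli : l ≤ i := by
      have h1 : max ((i : Int) - a + 1) 0 ≤ (i : Int) := by omega
      omega
    have hlth : l < d.length := by omega
    have h1 := sum_take_set d l (d.getD l 0 + 1) (m + 1) hlth
    have h2 := sum_take_set (d.set l (d.getD l 0 + 1)) (i + 1)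
      ((d.set l (d.getD l 0 + 1)).getD (i + 1) 0 - 1) (m + 1) (by simpa using hd)
    rw [h2, h1]
    have hlm : l < m + 1 ↔ (i : Int) - a + 1 ≤ (m : Int) := by
      constructor <;> intro h <;> omega
    by_cases hmi : m ≤ i
    · rw [if_neg (show ¬ (i + 1 < m + 1) by omega)]
      by_cases h4 : l < m + 1
      · rw [if_pos h4]
        rw [if_pos ((coversB_iff lis m i).mpr ⟨hmi, ha, by rw [← hA]; omega⟩)]
        ring
      · rw [if_neg h4]
        rw [if_neg (fun hc => h4 (hlm.mpr (by
          have := ((coversB_iff lis m i).mp hc).2.2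
          rw [← hA] at this; omega)))]
        ring
    · rw [if_pos (show i + 1 < m + 1 by omega), if_pos (show l < m + 1 by omega)]
      rw [if_neg (fun hc => hmi ((coversB_iff lis m i).mp hc).1)]
      ring
  · rw [if_neg ha]
    rw [if_neg (fun hc => ha ((coversB_iff lis m i).mp hc).2.1)]
    ring

theorem foldl_step_prefix (lis : List Int) (m : Nat) : ∀ (js : List Nat) (d : List Int),
    (∀ j ∈ js, j + 1 < d.length) →
    ((js.foldl (getFinalCakeB_step lis) d).take (m + 1)).sum
      = (d.take (m + 1)).sum + ((js.filter (fun j => coversB lis m j)).length : Int) := by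
  intro js
  induction js with
  | nil => intro d _; simp
  | cons j js ih =>
    intro d hb
    simp only [List.foldl_cons, List.filter_cons]
    rw [ih _ (by intro j' hj'; rw [step_length]; exact hb j' (by simp [hj']))]
    rw [step_prefix lis d j m (hb j (by simp))]
    by_cases hc : coversB lis m j
    · rw [if_pos hc, hc]; simp; ring
    · rw [if_neg hc]; simp only [Bool.not_eq_true] at hc; rw [hc]; simp

theorem sum_take_succ_getD (l : List Int) : ∀ (k : Nat),
    (l.take (k + 1)).sum = (l.take k).sum + l.getD k 0 := by
  induction l with
  | nil => intro k; simp
  | cons a l ih =>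
    intro k
    cases k with
    | zero => simp
    | succ k => simp only [List.take_succ_cons, List.sum_cons, List.getD_cons_succ, ih k]; ring

-- Stage-2 sweep: the accumulator is the prefix sum, the output is the 0/1 image of it.
theorem outB (diff : List Int) : ∀ (k : Nat),
    ((List.range k).foldl (fun (p : Int × List Int) i =>
        (p.1 + diff.getD i 0, p.2 ++ [if p.1 + diff.getD i 0 > 0 then (1 : Int) else 0]))
      ((0 : Int), ([] : List Int)))
      = ((diff.take k).sum,
         (List.range k).map (fun i => if (diff.take (i + 1)).sum > 0 then (1 : Int) else 0)) := by
  intro k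
  induction k with
  | zero => simp
  | succ k ih =>
    rw [List.range_succ, List.foldl_append, ih]
    simp only [List.foldl_cons, List.foldl_nil, List.map_append, List.map_cons, List.map_nil]
    rw [← sum_take_succ_getD]

-- B computes the spec: the prefix sum at i counts the j's covering layer i.
theorem alt_eq_spec (lis : List Int) (n : Int) :
    getFinalCake_alt lis n = cakeSpec lis n.toNat := by
  unfold getFinalCake_alt cakeSpec
  rw [outB]
  apply List.map_congr_left
  intro i hi
  have hi' : i < n.toNat := List.mem_range.mp hi
  have hpre : ((getFinalCakeB_diff lis n).take (i + 1)).sum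
      = (((List.range n.toNat).filter (fun j => coversB lis i j)).length : Int) := by
    unfold getFinalCakeB_diff
    rw [foldl_step_prefix lis i (List.range n.toNat) _ ?_]
    · simp
    · intro j hj
      have : j < n.toNat := List.mem_range.mp hj
      simp only [List.length_replicate]
      omega
  rw [hpre]
  by_cases h : (List.range n.toNat).any (coversB lis i)
  · rw [if_pos h, if_pos ?_]
    obtain ⟨j, hj, hc⟩ := List.any_eq_true.mp h
    have hm : j ∈ (List.range n.toNat).filter (fun j => coversB lis i j) :=
      List.mem_filter.mpr ⟨hj, hc⟩
    have := List.length_pos_of_mem hm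
    omega
  · rw [if_neg h, if_neg ?_]
    have he : (List.range n.toNat).filter (fun j => coversB lis i j) = [] := by
      rw [List.filter_eq_nil_iff]
      intro j hj hc
      exact h (List.any_eq_true.mpr ⟨j, hj, hc⟩)
    rw [he]
    simp

theorem goA_length (lis : List Int) : ∀ (k : Nat) (li : List Int) (x : Int),
    (getFinalCakeA_go lis k li x).length = li.length := by
  intro k
  induction k with
  | zero => intro li x; simp [getFinalCakeA_go]
  | succ k ih =>
    intro li x
    simp only [getFinalCakeA_go]
    rw [ih]
    split <;> split <;> first | rfl | simp

-- A's result, element by element: layer i ends 0 iff no j < k covers it and i is below the threshold x.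
theorem goA_get (lis : List Int) : ∀ (k : Nat) (li : List Int) (x : Int) (i : Nat)
    (h : i < li.length),
    (getFinalCakeA_go lis k li x)[i]'(by rw [goA_length]; exact h)
      = if i < k ∧ (List.range k).any (coversB lis i) = false ∧ ¬ (x ≤ (i : Int))
        then 0 else li[i] := by
  intro k
  induction k with
  | zero =>
    intro li x i h
    simp [getFinalCakeA_go]
  | succ k ih =>
    intro li x i h
    simp only [getFinalCakeA_go]
    set v := PySem.List.pyGetD lis (k : Int) 0 with hv
    set x' := if v > 0 ∧ x > (k : Int) - v + 1 then (k : Int) - v + 1 else x with hx'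
    set li' := if (k : Int) < x' then li.set k 0 else li with hli'
    have hlen' : li'.length = li.length := by rw [hli']; split <;> simp
    rw [ih li' x' i (by omega)]
    have hany : (List.range (k + 1)).any (coversB lis i)
        = ((List.range k).any (coversB lis i) || coversB lis i k) := by
      rw [List.range_succ, List.any_append]; simp
    have hx'cases : (x' = (k : Int) - v + 1 ∧ v > 0 ∧ x > (k : Int) - v + 1) ∨
        (x' = x ∧ ¬ (v > 0 ∧ x > (k : Int) - v + 1)) := by
      rw [hx']; split
      · exact Or.inl ⟨rfl, by assumption⟩
      · exact Or.inr ⟨rfl, by assumption⟩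
    by_cases hik : i < k
    · -- i strictly below k: li'[i] = li[i]; thresholds relate by the case analysis on x'.
      have hli'i : li'[i]'(by omega) = li[i] := by
        by_cases hcond : (k : Int) < x'
        · have he : li' = li.set k 0 := by rw [hli', if_pos hcond]
          rw [List.getElem_of_eq he, List.getElem_set_ne (by omega)]
        · have he : li' = li := by rw [hli', if_neg hcond]
          rw [List.getElem_of_eq he]
      rw [hli'i]
      have hck : coversB lis i k = true ↔ (0 < v ∧ (k : Int) - v + 1 ≤ (i : Int)) := by
        rw [coversB_iff, ← hv]
        exact ⟨fun hh => hh.2, fun hh => ⟨Nat.le_of_lt hik, hh⟩⟩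
      by_cases hb : (List.range k).any (coversB lis i) = true
      · have hb' : (List.range (k + 1)).any (coversB lis i) = true := by
          rw [hany, hb]; simp
        rw [if_neg (fun hh => by rw [hb] at hh; exact absurd hh.2.1 (by simp)),
            if_neg (fun hh => by rw [hb'] at hh; exact absurd hh.2.1 (by simp))]
      · have hbf : (List.range k).any (coversB lis i) = false := by
          simpa using hb
        by_cases hc : 0 < v ∧ (k : Int) - v + 1 ≤ (i : Int)
        · -- layer k covers i: both sides keep li[i].
          have h1 : coversB lis i k = true := hck.mpr hc
          have h2 : x' ≤ (i : Int) := by rcases hx'cases with ⟨he, _, _⟩ | ⟨he, hne⟩ <;> omega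
          have hb' : (List.range (k + 1)).any (coversB lis i) = true := by
            rw [hany, h1]; simp
          rw [if_neg (fun hh => hh.2.2 h2),
              if_neg (fun hh => by rw [hb'] at hh; exact absurd hh.2.1 (by simp))]
        · have h1 : coversB lis i k = false := by
            rcases Bool.eq_false_or_eq_true (coversB lis i k) with hh | hh
            · exact absurd (hck.mp hh) hc
            · exact hh
          have hb' : (List.range (k + 1)).any (coversB lis i) = false := by
            rw [hany, hbf, h1]; simp
          have hxeq : (x' ≤ (i : Int)) ↔ (x ≤ (i : Int)) := by
            rcases hx'cases with ⟨he, hv0, hxg⟩ | ⟨he, hne⟩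
            · constructor <;> intro hh <;> omega
            · rw [he]
          by_cases hx : x ≤ (i : Int)
          · rw [if_neg (fun hh => hh.2.2 (hxeq.mpr hx)), if_neg (fun hh => hh.2.2 hx)]
          · rw [if_pos ⟨hik, hbf, fun hh => hx (hxeq.mp hh)⟩,
                if_pos ⟨by omega, hb', hx⟩]
    · -- i ≥ k: only i = k is new; there A's set-to-0 matches "no cover and below threshold".
      rw [if_neg (fun hh => by omega)]
      by_cases hik' : i = k
      · subst hik'
        have hck : coversB lis i i = true ↔ 0 < v := by
          rw [coversB_iff, ← hv]
          exact ⟨fun hh => hh.2.1, fun hh => ⟨le_refl i, hh, by omega⟩⟩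
        have hnone : (List.range i).any (coversB lis i) = false := by
          rw [List.any_eq_false]
          intro j hj
          have hji : j < i := List.mem_range.mp hj
          intro hcj
          exact absurd ((coversB_iff lis i j).mp hcj).1 (by omega)
        have hli'k : li'[i]'(by omega) = if (i : Int) < x' then 0 else li[i] := by
          by_cases hcond : (i : Int) < x'
          · have he : li' = li.set i 0 := by rw [hli', if_pos hcond]
            rw [List.getElem_of_eq he, if_pos hcond, List.getElem_set_self (by simpa using h)]
          · have he : li' = li := by rw [hli', if_neg hcond]
            rw [List.getElem_of_eq he, if_neg hcond]
        rw [hli'k]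
        by_cases hcase : 0 < v
        · have h1 : coversB lis i i = true := hck.mpr hcase
          have h2 : ¬ ((i : Int) < x') := by
            rcases hx'cases with ⟨he, _, _⟩ | ⟨he, hne⟩ <;> omega
          have hb' : (List.range (i + 1)).any (coversB lis i) = true := by
            rw [hany, h1]; simp
          rw [if_neg h2,
              if_neg (fun hh => by rw [hb'] at hh; exact absurd hh.2.1 (by simp))]
        · have h1 : coversB lis i i = false := by
            rcases Bool.eq_false_or_eq_true (coversB lis i i) with hh | hh
            · exact absurd (hck.mp hh) hcase
            · exact hh
          have hb' : (List.range (i + 1)).any (coversB lis i) = false := by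
            rw [hany, hnone, h1]; simp
          have hx'x : x' = x := by
            rcases hx'cases with ⟨he, hv0, hxg⟩ | ⟨he, hne⟩
            · exact absurd hv0 hcase
            · exact he
          by_cases hx : x ≤ (i : Int)
          · rw [if_neg (by omega), if_neg (fun hh => hh.2.2 hx)]
          · rw [if_pos (by omega), if_pos ⟨Nat.lt_succ_self i, hb', hx⟩]
      · -- i > k: untouched everywhere.
        have hli'i : li'[i]'(by omega) = li[i] := by
          by_cases hcond : (k : Int) < x'
          · have he : li' = li.set k 0 := by rw [hli', if_pos hcond]
            rw [List.getElem_of_eq he, List.getElem_set_ne (by omega)]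
          · have he : li' = li := by rw [hli', if_neg hcond]
            rw [List.getElem_of_eq he]
        rw [hli'i, if_neg (fun hh => by omega)]

-- A computes the spec too.
theorem a_eq_spec (lis : List Int) (n : Int) :
    getFinalCake lis n = cakeSpec lis n.toNat := by
  unfold getFinalCake cakeSpec
  apply List.ext_getElem
  · rw [goA_length]; simp
  · intro i h1 h2
    have hi : i < n.toNat := by rw [goA_length] at h1; simpa using h1
    rw [goA_get lis n.toNat (List.replicate n.toNat 1) n i (by simpa using hi)]
    have hx : ¬ ((n : Int) ≤ (i : Int)) := by omega
    simp only [List.getElem_map, List.getElem_range, List.getElem_replicate]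
    by_cases h : (List.range n.toNat).any (coversB lis i)
    · rw [if_neg (fun hh => by rw [h] at hh; exact absurd hh.2.1 (by simp)), if_pos h]
    · rw [if_pos ⟨hi, by simpa using h, hx⟩, if_neg h]

-- ===== VERDICT (by name: the statement is the Claim_ definition above) =====
theorem getFinalCake_spec : Claim_equal_getFinalCake := by
  intro lis n _ _
  unfold Spec_getFinalCake
  rw [a_eq_spec, alt_eq_spec]
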